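-- pv_equiv track=rewrite | github.com/jintak0401/wlsxkr77_Baekjoon | 15824.py | solve
-- ===== SOURCE A (Python) =====
-- def solve(N, arr):
--     mod = 1_000_000_007
--     if N == 1: return 0
--     arr.sort()
--     power = [1] * N
--     power[0] = 0
--     power[1] = 2
--     for i in range(2, N):
--         power[i] = (2 * power[i-1]) % mod
--         power[i-1] -= 1
--     power[-1] -= 1
--
--     ans = 0
--     for i in range(N // 2):
--         ans = (ans + (power[tmp := N - 1 - i] - power[i]) * (arr[tmp] - arr[i])) % mod
--
--     return ans
-- ===== SOURCE B (Python) =====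
-- def solve(N, arr):
--     mod = 1_000_000_007
--     if N == 1:
--         return 0
--     arr.sort()
--     pow2 = [1]
--     for _ in range(N - 1):
--         pow2.append(pow2[-1] * 2 % mod)
--     ans = 0
--     for i in range(N):
--         ans = (ans + arr[i] * (pow2[i] - pow2[N - 1 - i])) % mod
--     return ans
-- ===== Notes on version B (the rewrite author's own statement) =====
-- stated objective: simpler
-- what changed: Replaces A's mutate-in-place '2^i - 1' power table and half-length symmetric pairing loop with a plain 2^i table and a single full pass adding each element's direct contribution arr[i]*(2^i - 2^(N-1-i)).
import Mathlib
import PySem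

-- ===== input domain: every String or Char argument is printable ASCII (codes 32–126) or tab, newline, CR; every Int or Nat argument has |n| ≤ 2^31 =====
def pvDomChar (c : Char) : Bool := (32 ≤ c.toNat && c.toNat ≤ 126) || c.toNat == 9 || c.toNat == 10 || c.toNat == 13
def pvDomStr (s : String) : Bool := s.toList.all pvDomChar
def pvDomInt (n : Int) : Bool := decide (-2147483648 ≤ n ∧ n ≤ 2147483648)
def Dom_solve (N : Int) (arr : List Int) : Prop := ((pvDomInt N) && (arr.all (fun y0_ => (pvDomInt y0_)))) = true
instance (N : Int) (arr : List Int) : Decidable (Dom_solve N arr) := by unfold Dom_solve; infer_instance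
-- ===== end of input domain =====

-- B replaces A's in-place '2^i - 1' power table and half-length pairing loop by a plain 2^i
-- table and one full pass adding each element's direct contribution arr[i]*(2^i - 2^(N-1-i));
-- both Pythons sort arr in place (same side effect); the claim is about the return value.


-- ===== PORT A =====
def solve (N : Int) (arr : List Int) : Int :=
  let md : Int := 1000000007
  if N = 1 then 0 else
    let a := PySem.List.sorted arr (fun x => x) false
    let power := List.replicate N.toNat (1 : Int)
    let power := PySem.List.pySetD power 0 0
    let power := PySem.List.pySetD power 1 2
    let power := (PySem.List.pyRange 2 N 1).foldl (fun p i =>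
        let p := PySem.List.pySetD p i (PySem.Int.mod (2 * PySem.List.pyGetD p (i - 1) 0) md)
        PySem.List.pySetD p (i - 1) (PySem.List.pyGetD p (i - 1) 0 - 1)) power
    let power := PySem.List.pySetD power (-1) (PySem.List.pyGetD power (-1) 0 - 1)
    (PySem.List.pyRange 0 (PySem.Int.floordiv N 2) 1).foldl (fun ans i =>
        let tmp := N - 1 - i
        PySem.Int.mod (ans + (PySem.List.pyGetD power tmp 0 - PySem.List.pyGetD power i 0) *
          (PySem.List.pyGetD a tmp 0 - PySem.List.pyGetD a i 0)) md) 0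

-- ===== PORT B =====
def solve_alt (N : Int) (arr : List Int) : Int :=
  let md : Int := 1000000007
  if N = 1 then 0 else
    let a := PySem.List.sorted arr (fun x => x) false
    let pow2 := (PySem.List.pyRange 0 (N - 1) 1).foldl (fun l _ =>
        l ++ [PySem.Int.mod (PySem.List.pyGetD l (-1) 0 * 2) md]) [(1 : Int)]
    (PySem.List.pyRange 0 N 1).foldl (fun ans i =>
        PySem.Int.mod (ans + PySem.List.pyGetD a i 0 *
          (PySem.List.pyGetD pow2 i 0 - PySem.List.pyGetD pow2 (N - 1 - i) 0)) md) 0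

-- ===== PRECONDITION & SPEC =====
-- Pre_ excludes exactly the inputs where A raises IndexError: N ≤ 0 (power[0] on an empty list)
-- and 2 ≤ N > len(arr) (arr[N-1-i] out of range).
def Pre_solve (N : Int) (arr : List Int) : Prop := N = 1 ∨ (2 ≤ N ∧ N ≤ arr.length)
instance (N : Int) (arr : List Int) : Decidable (Pre_solve N arr) := by unfold Pre_solve; infer_instance
def pvWitness_solve : Int × List Int := (3, [4, 1, 7])

def Spec_solve (N : Int) (arr : List Int) (out : Int) : Prop := out = solve_alt N arr
instance (N : Int) (arr : List Int) (out : Int) : Decidable (Spec_solve N arr out) := by unfold Spec_solve; infer_instance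

-- ===== CLAIM (what is proved, stated in full; the proofs are below) =====
def Claim_equal_solve : Prop := ∀ (N : Int) (arr : List Int), Dom_solve N arr → Pre_solve N arr → Spec_solve N arr (solve N arr)

-- ===== LEMMAS AND PROOFS =====

def pvP (k : Nat) : Int := 2 ^ k % 1000000007

lemma pvP_succ (k : Nat) : (2 * pvP k) % 1000000007 = pvP (k+1) := by
  unfold pvP
  conv_lhs => rw [Int.mul_emod, Int.emod_emod_of_dvd _ dvd_rfl, ← Int.mul_emod]
  ring_nf

lemma pvP_succ' (k : Nat) : (pvP k * 2) % 1000000007 = pvP (k+1) := by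
  rw [mul_comm, pvP_succ]

lemma foldl_mod_add {α : Type} (f : α → Int) (l : List α) (b : Int) :
    l.foldl (fun acc x => (acc + f x) % 1000000007) (b % 1000000007)
      = (b + (l.map f).sum) % 1000000007 := by
  induction l generalizing b with
  | nil => simp
  | cons x t ih =>
    simp only [List.foldl_cons, List.map_cons, List.sum_cons]
    rw [Int.emod_add_emod, ih (b + f x)]
    ring_nf

lemma pair_sum (n : Nat) : ∀ f : Nat → Int, (∀ i, n = 2*i+1 → f i = 0) →
    ((List.range n).map f).sum = ((List.range (n/2)).map (fun i => f i + f (n-1-i))).sum := by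
  induction n using Nat.strong_induction_on with
  | _ n ih =>
    intro f hmid
    match n with
    | 0 => simp
    | 1 => simpa using hmid 0 rfl
    | (n+2) =>
      have h1 : List.range (n+2) = List.range (n+1) ++ [n+1] := List.range_succ
      have h2 : List.range (n+1) = 0 :: (List.range n).map Nat.succ := List.range_succ_eq_map
      rw [h1, h2]
      have ihn := ih n (by omega) (fun i => f (i+1)) (fun i hi => hmid (i+1) (by omega))
      simp only [List.map_append, List.map_cons, List.sum_append, List.sum_cons,
        List.map_map, List.map_nil, List.sum_nil]
      have hc : (List.range n).map (f ∘ Nat.succ) = (List.range n).map (fun i => f (i+1)) := by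
        simp [Function.comp]
      rw [hc, ihn]
      have h3 : (n+2)/2 = n/2 + 1 := by omega
      rw [h3, List.range_succ_eq_map]
      simp only [List.map_cons, List.sum_cons, List.map_map]
      have hc2 : (List.range (n/2)).map ((fun i => f i + f (n+2-1-i)) ∘ Nat.succ)
          = (List.range (n/2)).map (fun i => f (i+1) + f (n-1-i+1)) := by
        apply List.map_congr_left
        intro i hi
        simp only [List.mem_range] at hi
        simp only [Function.comp]
        congr 2
        omega
      rw [hc2]
      have h4 : (2+n-1-0 : Nat) = 1+n := by omega
      ring_nf
      rw [h4]

lemma pymod_eq (x : Int) : PySem.Int.mod x 1000000007 = x % 1000000007 :=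
  PySem.Int.mod_eq_emod_of_pos (by norm_num)

lemma powB_char (L : List Int) (m : Nat) :
    L.foldl (fun l _ => l ++ [PySem.List.pyGetD l (-1) 0 * 2 % 1000000007])
        ((List.range (m+1)).map pvP)
      = (List.range (L.length + (m+1))).map pvP := by
  induction L generalizing m with
  | nil => simp
  | cons x t ih =>
    simp only [List.foldl_cons]
    have h1 : (List.range (m+1)).map pvP = (List.range m).map pvP ++ [pvP m] := by
      rw [List.range_succ, List.map_append, List.map_cons, List.map_nil]
    rw [h1, PySem.List.pyGetD_neg_one_append_singleton, pvP_succ']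
    have h2 : (List.range m).map pvP ++ [pvP m] ++ [pvP (m+1)] = (List.range (m+2)).map pvP := by
      rw [show m + 2 = (m+1)+1 from rfl, List.range_succ, List.range_succ]
      simp
    rw [h2, show m + 2 = (m+1)+1 from rfl, ih (m+1),
      show t.length + (m+1+1) = (x::t).length + (m+1) from by simp; omega]


lemma getD_append_len (l1 l2 : List Int) (x d : Int) :
    (l1 ++ x :: l2).getD l1.length d = x := by
  simp [List.getD_eq_getElem?_getD]

lemma set_append_len (l1 l2 : List Int) (x v : Int) :
    (l1 ++ x :: l2).set l1.length v = l1 ++ v :: l2 := by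
  rw [List.set_append_right _ _ (le_refl l1.length)]
  simp

lemma powA_inv (n : Nat) (h2 : 2 ≤ n) (m : Nat) (hm : m ≤ n - 2) :
    (List.range m).foldl
      (fun (x : List Int) (y : Nat) =>
        PySem.List.pySetD
          (PySem.List.pySetD x (2 + (y:Int)) (2 * PySem.List.pyGetD x (2 + (y:Int) - 1) 0 % 1000000007))
          (2 + (y:Int) - 1)
          (PySem.List.pyGetD
              (PySem.List.pySetD x (2 + (y:Int)) (2 * PySem.List.pyGetD x (2 + (y:Int) - 1) 0 % 1000000007))
              (2 + (y:Int) - 1) 0 - 1))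
      (PySem.List.pySetD (PySem.List.pySetD (List.replicate ((n:Int)).toNat 1) 0 0) 1 2)
    = ((List.range (m+1)).map (fun k => pvP k - 1)) ++ [pvP (m+1)] ++ List.replicate (n-m-2) 1 := by
  induction m with
  | zero =>
    obtain ⟨k, rfl⟩ : ∃ k, n = k + 2 := ⟨n - 2, by omega⟩
    simp only [List.range_zero, List.foldl_nil]
    rw [PySem.List.pySetD_of_nonneg (i := 1) _ _ (by norm_num),
      PySem.List.pySetD_of_nonneg (i := 0) _ _ (by norm_num)]
    norm_num [pvP, List.range_succ]
    rw [show ((k:Int)+2).toNat = k + 2 from by omega]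
    simp [List.replicate_succ, List.set]
  | succ m ih =>
    have hm' : m ≤ n - 2 := by omega
    rw [List.range_succ, List.foldl_append, ih hm', List.foldl_cons, List.foldl_nil]
    obtain ⟨r, hr⟩ : ∃ r, n - m - 2 = r + 1 := ⟨n - m - 3, by omega⟩
    set A : List Int := (List.range (m+1)).map (fun k => pvP k - 1) with hA
    have hAlen : A.length = m + 1 := by simp [hA]
    have e1 : (2 + (m:Int) - 1) = ((m+1 : Nat) : Int) := by push_cast; ring
    have e2 : (2 + (m:Int)) = ((m+2 : Nat) : Int) := by push_cast; ring
    have hv : 2 * pvP (m+1) % 1000000007 = pvP (m+2) := pvP_succ (m+1)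
    have g1 : (A ++ pvP (m+1) :: 1 :: List.replicate r 1).getD (m+1) 0 = pvP (m+1) := by
      have h := getD_append_len A ((1:Int) :: List.replicate r 1) (pvP (m+1)) 0
      rwa [hAlen] at h
    have h1 : (A ++ pvP (m+1) :: 1 :: List.replicate r 1).set (m+2) (pvP (m+2))
        = A ++ pvP (m+1) :: pvP (m+2) :: List.replicate r 1 := by
      have h := set_append_len (A ++ [pvP (m+1)]) (List.replicate r 1) 1 (pvP (m+2))
      simp only [List.length_append, hAlen, List.length_cons, List.length_nil,
        List.append_assoc, List.singleton_append] at h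
      simpa using h
    have g2 : (A ++ pvP (m+1) :: pvP (m+2) :: List.replicate r 1).getD (m+1) 0 = pvP (m+1) := by
      have h := getD_append_len A (pvP (m+2) :: List.replicate r 1) (pvP (m+1)) 0
      rwa [hAlen] at h
    have h2 : (A ++ pvP (m+1) :: pvP (m+2) :: List.replicate r 1).set (m+1) (pvP (m+1) - 1)
        = A ++ (pvP (m+1) - 1) :: pvP (m+2) :: List.replicate r 1 := by
      have h := set_append_len A (pvP (m+2) :: List.replicate r 1) (pvP (m+1)) (pvP (m+1) - 1)
      rwa [hAlen] at h
    rw [hr, show n - (m+1) - 2 = r from by omega, List.replicate_succ]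
    simp only [List.append_assoc, List.singleton_append]
    simp only [e1]
    simp only [e2]
    simp only [PySem.List.pySetD_natCast, PySem.List.pyGetD_natCast]
    rw [g1, hv, h1, g2, h2]
    rw [show m + 1 + 1 = m + 2 from rfl, List.range_succ]
    simp [hA, List.append_assoc]

lemma pySetD_append_neg_one (xs : List Int) (x v : Int) :
    PySem.List.pySetD (xs ++ [x]) (-1) v = xs ++ [v] := by
  simp [PySem.List.pySetD, PySem.List.pySet?, PySem.List.pyIdx?]

lemma foldl_mod_add0 {α : Type} (f : α → Int) (l : List α) :
    l.foldl (fun acc x => (acc + f x) % 1000000007) 0 = (l.map f).sum % 1000000007 := by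
  simpa using foldl_mod_add f l 0

lemma solve_eq (n : Nat) (arr : List Int) (h2 : 2 ≤ n) :
    solve (n : Int) arr = (((List.range (n/2)).map (fun i =>
      (pvP (n-1-i) - pvP i) * ((PySem.List.sorted arr (fun x => x) false).getD (n-1-i) 0
        - (PySem.List.sorted arr (fun x => x) false).getD i 0))).sum) % 1000000007 := by
  simp only [solve, pymod_eq]
  rw [if_neg (by omega : ¬ ((n:Int) = 1))]
  rw [PySem.List.pyRange_one 2 (n:Int), show ((n:Int) - 2).toNat = n - 2 from by omega]
  rw [List.foldl_map]
  rw [powA_inv n h2 (n-2) (le_refl _)]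
  rw [show n - 2 + 1 = n - 1 from by omega, show n - (n-2) - 2 = 0 from by omega]
  rw [List.replicate, List.append_nil]
  rw [PySem.List.pyGetD_neg_one_append_singleton, pySetD_append_neg_one]
  have hPW : (List.range (n-1)).map (fun k => pvP k - 1) ++ [pvP (n-1) - 1]
      = (List.range n).map (fun k => pvP k - 1) := by
    rw [show n = (n-1) + 1 from by omega, List.range_succ]
    simp
  rw [hPW]
  rw [PySem.Int.floordiv_eq_ediv_of_pos (by norm_num), show ((n:Int)) / 2 = ((n/2 : Nat) : Int) from by omega]
  rw [PySem.List.pyRange_zero_natCast (n/2), List.foldl_map]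
  rw [PySem.List.foldl_congr_mem _ _ (fun (ans : Int) (k : Nat) =>
      (ans + (pvP (n-1-k) - pvP k) * ((PySem.List.sorted arr (fun x => x) false).getD (n-1-k) 0
        - (PySem.List.sorted arr (fun x => x) false).getD k 0)) % 1000000007) 0 ?_]
  · rw [foldl_mod_add0]
  · intro acc x hx
    rw [List.mem_range] at hx
    rw [show ((n:Int) - 1 - (x:Int)) = ((n-1-x : Nat) : Int) from by omega]
    rw [PySem.List.pyGetD_natCast, PySem.List.pyGetD_natCast, PySem.List.pyGetD_natCast,
      PySem.List.pyGetD_natCast]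
    rw [PySem.List.getD_map_range _ _ _ _ (by omega), PySem.List.getD_map_range _ _ _ _ (by omega)]
    ring_nf

lemma solve_alt_eq (n : Nat) (arr : List Int) (h2 : 2 ≤ n) :
    solve_alt (n : Int) arr = (((List.range n).map (fun i =>
      (PySem.List.sorted arr (fun x => x) false).getD i 0 * (pvP i - pvP (n-1-i)))).sum) % 1000000007 := by
  simp only [solve_alt, pymod_eq]
  rw [if_neg (by omega : ¬ ((n:Int) = 1))]
  rw [show [(1:Int)] = (List.range (0+1)).map pvP from by norm_num [pvP]]
  rw [powB_char]
  rw [show (PySem.List.pyRange 0 ((n:Int) - 1)).length + (0+1) = n from by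
    rw [PySem.List.length_pyRange_one]; omega]
  rw [PySem.List.pyRange_zero_natCast n, List.foldl_map]
  rw [PySem.List.foldl_congr_mem _ _ (fun (ans : Int) (k : Nat) =>
      (ans + (PySem.List.sorted arr (fun x => x) false).getD k 0 * (pvP k - pvP (n-1-k)))
        % 1000000007) 0 ?_]
  · rw [foldl_mod_add0]
  · intro acc x hx
    rw [List.mem_range] at hx
    rw [show ((n:Int) - 1 - (x:Int)) = ((n-1-x : Nat) : Int) from by omega]
    rw [PySem.List.pyGetD_natCast, PySem.List.pyGetD_natCast, PySem.List.pyGetD_natCast]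
    rw [PySem.List.getD_map_range _ _ _ _ (by omega : n-1-x < n),
      PySem.List.getD_map_range _ _ _ _ (by omega : x < n)]

-- ===== VERDICT (by name: the statement is the Claim_ definition above) =====
theorem solve_spec : Claim_equal_solve := by
  intro N arr _ hpre
  unfold Spec_solve
  rcases hpre with h1 | ⟨hge, hlen⟩
  · subst h1; simp [solve, solve_alt]
  · have hN : N = ((N.toNat : Nat) : Int) := (Int.toNat_of_nonneg (by omega)).symm
    rw [hN]
    set n : Nat := N.toNat with hn
    have h2 : 2 ≤ n := by omega
    rw [solve_eq n arr h2, solve_alt_eq n arr h2]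
    set a : List Int := PySem.List.sorted arr (fun x => x) false with ha
    have hmid : ∀ i, n = 2*i+1 → a.getD i 0 * (pvP i - pvP (n-1-i)) = 0 := by
      intro i hi
      rw [show n-1-i = i from by omega]
      ring
    rw [pair_sum n (fun i => a.getD i 0 * (pvP i - pvP (n-1-i))) hmid]
    congr 1
    apply congrArg (List.sum (α := Int))
    apply List.map_congr_left
    intro i hi
    rw [List.mem_range] at hi
    rw [show n-1-(n-1-i) = i from by omega]
    ring
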